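-- pv_equiv track=rewrite | github.com/hhycz/zhouyi | backend/app/services/solar_time.py | get_shichen_from_hour
-- ===== SOURCE A (Python) =====
-- from typing import Tuple
--
-- def get_shichen_from_hour(hour: int) -> Tuple[str, str]:
--     """
--     根据小时获取时辰
--
--     Args:
--         hour: 小时 (0-23)
--
--     Returns:
--         (地支, 时辰名称)
--     """
--     shichen_map = [
--         (23, 1, "子", "子时"),   # 23:00 - 00:59
--         (1, 3, "丑", "丑时"),    # 01:00 - 02:59
--         (3, 5, "寅", "寅时"),
--         (5, 7, "卯", "卯时"),
--         (7, 9, "辰", "辰时"),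
--         (9, 11, "巳", "巳时"),
--         (11, 13, "午", "午时"),
--         (13, 15, "未", "未时"),
--         (15, 17, "申", "申时"),
--         (17, 19, "酉", "酉时"),
--         (19, 21, "戌", "戌时"),
--         (21, 23, "亥", "亥时"),
--     ]
--
--     for start, end, zhi, name in shichen_map:
--         if start <= hour < end or (start == 23 and (hour >= 23 or hour < 1)):
--             return zhi, name
--
--     return "子", "子时"  # Default
-- ===== SOURCE B (Python) =====
-- def get_shichen_from_hour(hour: int):
--     """根据小时获取时辰 (地支, 时辰名称)."""
--     names = ["子", "丑", "寅", "卯", "辰", "巳", "午", "未", "申", "酉", "戌", "亥"]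
--     if hour >= 23 or hour < 1:
--         zhi = "子"
--     else:
--         zhi = names[(hour + 1) // 2]
--     return zhi, zhi + "时"
-- ===== Notes on version B (the rewrite author's own statement) =====
-- stated objective: simpler
-- what changed: Replaces the per-entry (start,end,zhi,name) range-table scan with a single wrap guard (hour>=23 or hour<1 -> zi) plus direct arithmetic indexing names[(hour+1)//2] into a twelve-name list, building the shichen name as zhi+'shi'.
import Mathlib
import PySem

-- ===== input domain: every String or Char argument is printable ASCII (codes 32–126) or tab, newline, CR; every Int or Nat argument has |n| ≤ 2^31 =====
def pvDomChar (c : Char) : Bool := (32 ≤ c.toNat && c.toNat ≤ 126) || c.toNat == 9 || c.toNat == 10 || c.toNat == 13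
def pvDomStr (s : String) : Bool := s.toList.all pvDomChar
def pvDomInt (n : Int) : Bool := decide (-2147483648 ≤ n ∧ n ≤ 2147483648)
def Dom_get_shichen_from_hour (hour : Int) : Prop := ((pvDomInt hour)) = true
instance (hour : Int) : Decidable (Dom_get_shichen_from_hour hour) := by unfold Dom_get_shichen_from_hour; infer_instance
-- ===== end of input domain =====

-- B replaces A's 12-entry range-table scan by a wrap guard plus direct arithmetic indexing (simpler).

-- ===== PORT A =====
-- the 'for start, end, zhi, name in shichen_map' loop as structural recursion over the table
def shichenScan (hour : Int) : List (Int × Int × String × String) → String × String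
  | [] => ("子", "子时")  -- default after the loop
  | (s, e, zhi, name) :: rest =>
      if (s ≤ hour ∧ hour < e) ∨ (s = 23 ∧ (hour ≥ 23 ∨ hour < 1)) then (zhi, name)
      else shichenScan hour rest

def get_shichen_from_hour (hour : Int) : String × String :=
  shichenScan hour
    [ (23, 1, "子", "子时"),
      (1, 3, "丑", "丑时"),
      (3, 5, "寅", "寅时"),
      (5, 7, "卯", "卯时"),
      (7, 9, "辰", "辰时"),
      (9, 11, "巳", "巳时"),
      (11, 13, "午", "午时"),
      (13, 15, "未", "未时"),
      (15, 17, "申", "申时"),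
      (17, 19, "酉", "酉时"),
      (19, 21, "戌", "戌时"),
      (21, 23, "亥", "亥时") ]

-- ===== PORT B =====
def get_shichen_from_hour_alt (hour : Int) : String × String :=
  let names := ["子", "丑", "寅", "卯", "辰", "巳", "午", "未", "申", "酉", "戌", "亥"]
  let zhi :=
    if hour ≥ 23 ∨ hour < 1 then "子"
    -- names[(hour+1)//2]: the guard ensures 1 ≤ hour ≤ 22, so the index 1..11 is in range
    else names.getD (PySem.Int.floordiv (hour + 1) 2).toNat "子"
  (zhi, zhi ++ "时")

-- ===== PRECONDITION & SPEC =====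
def Spec_get_shichen_from_hour (hour : Int) (out : String × String) : Prop := out = get_shichen_from_hour_alt hour
instance (hour : Int) (out : String × String) : Decidable (Spec_get_shichen_from_hour hour out) := by unfold Spec_get_shichen_from_hour; infer_instance

-- ===== CLAIM (what is proved, stated in full; the proofs are below) =====
def Claim_equal_get_shichen_from_hour : Prop := ∀ (hour : Int), Dom_get_shichen_from_hour hour → Spec_get_shichen_from_hour hour (get_shichen_from_hour hour)

-- ===== LEMMAS AND PROOFS =====

-- ===== VERDICT (by name: the statement is the Claim_ definition above) =====
theorem get_shichen_from_hour_spec : Claim_equal_get_shichen_from_hour := by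
  intro hour _
  unfold Spec_get_shichen_from_hour
  by_cases hw : hour ≥ 23 ∨ hour < 1
  · rcases hw with h | h <;>
      simp [get_shichen_from_hour, shichenScan, get_shichen_from_hour_alt, h, h.le] <;>
      omega
  · have h1 : 1 ≤ hour := by omega
    have h2 : hour ≤ 22 := by omega
    interval_cases hour <;> decide
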